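-- pv_equiv track=rewrite | github.com/snehabangar/Sentiment-Analysis-NLP | ReviewAnalyzer/src/yelp/review/analyze/review.py | concatenate_words
-- ===== SOURCE A (Python) =====
-- def concatenate_words(index, text, ngram_words):
--     word = text[index]
--     if index == len(text)-1:
--         return word, index
--     if word in ngram_words:
--         [word_new, new_index] = concatenate_words(index+1, text, ngram_words)
--         word = word + ' ' + word_new
--         index = new_index
--     return word, index
-- ===== SOURCE B (Python) =====
-- def concatenate_words(index, text, ngram_words):
--     j = index
--     while j < len(text) - 1 and text[j] in ngram_words:
--         j += 1
--     return ' '.join(text[index:j + 1]), j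
-- ===== Notes on version B (the rewrite author's own statement) =====
-- stated objective: simpler
-- what changed: Replaces the recursion that rebuilds the result by repeated string concatenation with a single iterative forward scan for the stop index followed by one join over the slice.
-- outside the precondition, e.g. on concatenate_words(-1, ['a', 'b'], set()): A returns ('b', -1), B returns ('', -1)
import Mathlib
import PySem

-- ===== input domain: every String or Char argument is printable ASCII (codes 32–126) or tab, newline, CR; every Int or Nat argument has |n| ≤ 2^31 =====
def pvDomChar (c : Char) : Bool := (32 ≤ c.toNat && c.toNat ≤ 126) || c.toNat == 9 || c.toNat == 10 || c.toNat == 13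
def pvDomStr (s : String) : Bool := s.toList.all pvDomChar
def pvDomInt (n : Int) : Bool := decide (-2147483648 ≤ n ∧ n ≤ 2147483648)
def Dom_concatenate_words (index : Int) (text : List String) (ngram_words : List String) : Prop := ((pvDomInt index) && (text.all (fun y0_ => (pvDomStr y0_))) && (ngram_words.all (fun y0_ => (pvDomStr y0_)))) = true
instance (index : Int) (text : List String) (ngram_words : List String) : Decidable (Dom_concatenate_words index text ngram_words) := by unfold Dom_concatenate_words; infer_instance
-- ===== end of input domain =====

-- B replaces A's recursion-with-repeated-concatenation by an iterative scan for the
-- stop index plus one join over the slice (objective: simpler).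

-- used by the ports' termination proofs (cited in decreasing_by)
theorem pv_lt_of_pyGet?_some {α : Type} (xs : List α) (i : Int) (w : α)
    (h : PySem.List.pyGet? xs i = some w) : i < xs.length := by
  by_contra hc
  have hn : ¬ PySem.Raise.InRange xs.length i := by simp [PySem.Raise.InRange]; omega
  rw [← PySem.List.pyGet?_eq_none_iff] at hn
  simp [hn] at h

-- ===== PORT A =====
-- the 'none' branch is Python's IndexError (text[index] out of range); excluded by Pre_
def concatenate_words (index : Int) (text : List String) (ngram_words : List String) : String × Int :=
  match h : PySem.List.pyGet? text index with
  | none => ("", index)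
  | some word =>
    if index = (text.length : Int) - 1 then (word, index)
    else if word ∈ ngram_words then
      let r := concatenate_words (index + 1) text ngram_words
      (word ++ " " ++ r.1, r.2)
    else (word, index)
termination_by ((text.length : Int) - index).toNat
decreasing_by
  have := pv_lt_of_pyGet?_some text index word h
  omega

-- ===== PORT B =====
-- the while loop of Source B: advance j while j < len(text)-1 and text[j] in ngram_words
def cwScan (j : Int) (text : List String) (ngram_words : List String) : Int :=
  if j < (text.length : Int) - 1 ∧ (PySem.List.pyGetD text j "") ∈ ngram_words then
    cwScan (j + 1) text ngram_words
  else j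
termination_by ((text.length : Int) - 1 - j).toNat
decreasing_by omega

def concatenate_words_alt (index : Int) (text : List String) (ngram_words : List String) : String × Int :=
  let j := cwScan index text ngram_words
  (PySem.Str.join " " (PySem.List.slice text (some index) (some (j + 1))), j)

-- ===== PRECONDITION & SPEC =====
-- Pre_ restricts to the function's natural domain: a real position 0 ≤ index < len(text).
-- It excludes index ≥ len(text) (and index < -len), where A raises IndexError, and the
-- negative in-range indices, where A returns via Python's negative-index wraparound,
-- a behaviour outside the task's natural domain (see the cite in claim.json).
def Pre_concatenate_words (index : Int) (text : List String) (ngram_words : List String) : Prop :=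
  0 ≤ index ∧ index < text.length
instance (index : Int) (text : List String) (ngram_words : List String) : Decidable (Pre_concatenate_words index text ngram_words) := by unfold Pre_concatenate_words; infer_instance

def pvWitness_concatenate_words : Int × List String × List String := (0, ["a", "b"], ["a"])

def Spec_concatenate_words (index : Int) (text : List String) (ngram_words : List String) (out : String × Int) : Prop := out = concatenate_words_alt index text ngram_words
instance (index : Int) (text : List String) (ngram_words : List String) (out : String × Int) : Decidable (Spec_concatenate_words index text ngram_words out) := by unfold Spec_concatenate_words; infer_instance

-- ===== CLAIM (what is proved, stated in full; the proofs are below) =====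
def Claim_equal_concatenate_words : Prop := ∀ (index : Int) (text : List String) (ngram_words : List String), Dom_concatenate_words index text ngram_words → Pre_concatenate_words index text ngram_words → Spec_concatenate_words index text ngram_words (concatenate_words index text ngram_words)

-- ===== LEMMAS AND PROOFS =====

theorem pyGet?_at_nat (text : List String) (i : Nat) (hi : i < text.length) :
    PySem.List.pyGet? text (i : Int) = some text[i] := by
  rw [PySem.List.pyGet?_eq_some_getElem text (by omega) (by exact_mod_cast hi)]
  simp

theorem pyGetD_at_nat (text : List String) (i : Nat) (hi : i < text.length) :
    PySem.List.pyGetD text (i : Int) "" = text[i] := by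
  rw [PySem.List.pyGetD_eq_getElem text "" (by omega) (by exact_mod_cast hi)]
  simp

theorem cast_succ (i : Nat) : (i : Int) + 1 = ((i + 1 : Nat) : Int) := by push_cast; ring

-- the scan stops at a genuine index: i ≤ cwScan i ≤ len-1
theorem cwScan_bounds (text ngram_words : List String) :
    ∀ (d : Nat) (i : Nat), text.length - 1 - i ≤ d → i < text.length →
      ∃ k : Nat, cwScan (i : Int) text ngram_words = (k : Int) ∧ i ≤ k ∧ k < text.length := by
  intro d
  induction d with
  | zero =>
    intro i hd hi
    refine ⟨i, ?_, le_refl i, hi⟩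
    rw [cwScan, if_neg (by intro ⟨h1, _⟩; omega)]
  | succ d ih =>
    intro i hd hi
    rw [cwScan]
    by_cases hc : ((i : Int) < (text.length : Int) - 1 ∧ (PySem.List.pyGetD text i "") ∈ ngram_words)
    · obtain ⟨k, hk, hik, hkl⟩ := ih (i + 1) (by omega) (by omega)
      refine ⟨k, ?_, by omega, hkl⟩
      rw [if_pos hc, cast_succ]
      exact hk
    · exact ⟨i, by rw [if_neg hc], le_refl i, hi⟩

theorem join_singleton_str (p : String) : PySem.Str.join " " [p] = p := by
  rw [← String.toList_inj, PySem.Str.toList_join]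
  simp [PySem.Chars.join_singleton]

theorem join_cons_str (p q : String) (rest : List String) :
    PySem.Str.join " " (p :: q :: rest) = p ++ " " ++ PySem.Str.join " " (q :: rest) := by
  rw [← String.toList_inj, PySem.Str.toList_join]
  simp [PySem.Chars.join_cons_cons, PySem.Str.toList_join]

theorem slice_cons (text : List String) (i k : Nat) (hi : i < text.length) (hik : i ≤ k) :
    PySem.List.slice text (some (i : Int)) (some ((k : Int) + 1))
      = text[i] :: PySem.List.slice text (some ((i : Int) + 1)) (some ((k : Int) + 1)) := by
  rw [cast_succ k, cast_succ i, PySem.List.slice_natCast, PySem.List.slice_natCast,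
      show k + 1 - i = (k + 1 - (i + 1)) + 1 by omega,
      List.drop_eq_getElem_cons hi, List.take_succ_cons]

theorem slice_singleton (text : List String) (i : Nat) (hi : i < text.length) :
    PySem.List.slice text (some (i : Int)) (some ((i : Int) + 1)) = [text[i]] := by
  rw [cast_succ i, PySem.List.slice_natCast, show i + 1 - i = 1 by omega,
      List.drop_eq_getElem_cons hi, List.take_succ_cons]
  simp

theorem slice_len (text : List String) (i k : Nat) (hik : i ≤ k) (hk : k < text.length) :
    (PySem.List.slice text (some ((i : Int) + 1)) (some ((k : Int) + 1))).length = k - i := by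
  rw [cast_succ k, cast_succ i, PySem.List.slice_natCast]
  simp only [List.length_take, List.length_drop]
  omega

theorem cw_main (text ngram_words : List String) :
    ∀ (d : Nat) (i : Nat), text.length - i ≤ d → i < text.length →
      concatenate_words (i : Int) text ngram_words = concatenate_words_alt (i : Int) text ngram_words := by
  intro d
  induction d with
  | zero => intro i hd hi; omega
  | succ d ih =>
    intro i hd hi
    rw [concatenate_words, pyGet?_at_nat text i hi]
    simp only
    unfold concatenate_words_alt
    simp only
    by_cases hlast : (i : Int) = (text.length : Int) - 1
    · -- last element: the scan stops at once and the slice is a singleton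
      have hstop : cwScan (i : Int) text ngram_words = (i : Int) := by
        rw [cwScan, if_neg (by intro ⟨h1, _⟩; omega)]
      rw [if_pos hlast, hstop, slice_singleton text i hi, join_singleton_str]
    · rw [if_neg hlast]
      by_cases hmem : text[i] ∈ ngram_words
      · rw [if_pos hmem]
        -- the scan takes one step
        have hcond : ((i : Int) < (text.length : Int) - 1 ∧ (PySem.List.pyGetD text i "") ∈ ngram_words) :=
          ⟨by omega, by rw [pyGetD_at_nat text i hi]; exact hmem⟩
        have hstep : cwScan (i : Int) text ngram_words = cwScan ((i : Int) + 1) text ngram_words := by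
          rw [cwScan, if_pos hcond]
        have hi1 : i + 1 < text.length := by omega
        have hih := ih (i + 1) (by omega) hi1
        rw [← cast_succ i] at hih
        rw [hih]
        unfold concatenate_words_alt
        simp only
        obtain ⟨k, hk, hik, hkl⟩ := by
          have h := cwScan_bounds text ngram_words (text.length - 1 - (i + 1)) (i + 1) (le_refl _) hi1
          rwa [← cast_succ i] at h
        rw [hstep, hk]
        refine Prod.ext ?_ rfl
        simp only
        rw [slice_cons text i k hi (by omega)]
        have hlen : (PySem.List.slice text (some ((i : Int) + 1)) (some ((k : Int) + 1))).length = k - i :=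
          slice_len text i k (by omega) hkl
        have hne : PySem.List.slice text (some ((i : Int) + 1)) (some ((k : Int) + 1)) ≠ [] := by
          intro hnil
          rw [hnil] at hlen
          simp at hlen
          omega
        obtain ⟨q, rest, hqr⟩ := List.exists_cons_of_ne_nil hne
        rw [hqr, join_cons_str, ← hqr]
      · rw [if_neg hmem]
        have hstop : cwScan (i : Int) text ngram_words = (i : Int) := by
          rw [cwScan, if_neg (by intro ⟨_, h2⟩; rw [pyGetD_at_nat text i hi] at h2; exact hmem h2)]
        rw [hstop, slice_singleton text i hi, join_singleton_str]

-- ===== VERDICT (by name: the statement is the Claim_ definition above) =====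
theorem concatenate_words_spec : Claim_equal_concatenate_words := by
  intro index text ngram_words _hdom hpre
  unfold Spec_concatenate_words
  obtain ⟨h0, hlt⟩ := hpre
  have hidx : index = ((index.toNat : Nat) : Int) := by omega
  rw [hidx]
  exact cw_main text ngram_words text.length index.toNat (by omega) (by omega)
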